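-- pv_equiv track=rewrite | github.com/ZAmirX/HCR2-Team-Tracker | SSReaderBot.py | consectutive_group_to_string
-- ===== SOURCE A (Python) =====
-- def group(L):
--     """Sort a list of integers into consecutive numbers and return the list of start and end numbers for each group."""
--     first = last = L[0]
--     for n in L[1:]:
--         if n - 1 == last:  # Part of the group, bump the end
--             last = n
--         else:  # Not part of the group, yield current group and start a new
--             yield first, last
--             first = last = n
--     yield first, last  # Yield the last group
--
-- def consectutive_group_to_string(l):
--     """Use the group function to get the list of groups and turn it into a readable string."""
--     out_string = "Successfully added data on teams in positions"
--     grouped_list = group(l)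
--     for i, rnge in enumerate(grouped_list):
--         # If not first range then we need a separator inserted in the string
--         if i != 0:
--             out_string += " and"
--         # Check if it's an actual range or a single digit and insert into the string
--         if rnge[0] != rnge[1]:
--             out_string += " " + str(rnge[0]) + "-" + str(rnge[1])
--         else:
--             out_string += " " + str(rnge[0])
--     # End the string with a dot
--     out_string += "."
--     # Return the final string
--     return out_string
-- ===== SOURCE B (Python) =====
-- def consectutive_group_to_string(l):
--     """Use the group function to get the list of groups and turn it into a readable string."""
--     # Staged, stateless approach: find the break positions by indexing adjacent
--     # pairs, turn them into (start, end) index bounds, and read each run's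
--     # endpoints straight out of the list.
--     n = len(l)
--     breaks = [i for i in range(1, n) if l[i] != l[i - 1] + 1]
--     bounds = [0] + breaks + [n]
--     pieces = []
--     for s, e in zip(bounds, bounds[1:]):
--         a, b = l[s], l[e - 1]
--         pieces.append(str(a) if a == b else str(a) + "-" + str(b))
--     return "Successfully added data on teams in positions " + " and ".join(pieces) + "."
-- ===== Notes on version B (the rewrite author's own statement) =====
-- stated objective: alternative
-- what changed: Replaces A's stateful generator that tracks a running (first, last) pair with a stateless staged computation: collect the break indices by comparing adjacent elements, turn them into (start, end) bound pairs, and read each run's endpoints straight out of the list by index, joining the formatted pieces with ' and '.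
import Mathlib
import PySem

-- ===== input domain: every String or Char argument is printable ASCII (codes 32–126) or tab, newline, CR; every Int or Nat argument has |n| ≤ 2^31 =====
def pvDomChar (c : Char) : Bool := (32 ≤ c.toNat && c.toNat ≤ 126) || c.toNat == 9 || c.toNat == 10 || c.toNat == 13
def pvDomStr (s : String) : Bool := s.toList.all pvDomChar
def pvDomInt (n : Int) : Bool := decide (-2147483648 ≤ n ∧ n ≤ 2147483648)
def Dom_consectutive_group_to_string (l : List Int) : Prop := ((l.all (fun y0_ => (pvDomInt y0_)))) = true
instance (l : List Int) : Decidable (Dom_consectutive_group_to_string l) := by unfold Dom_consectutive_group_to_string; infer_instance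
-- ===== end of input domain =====

-- B replaces A's stateful generator scan with a staged stateless computation (break indices -> bound pairs -> endpoint lookups); objective: alternative.


-- ===== PORT A =====
-- the generator 'group', fully consumed: each yield appends to the result list
def pvGroupA (first last : Int) (rest : List Int) : List (Int × Int) :=
  match rest with
  | [] => [(first, last)]
  | n :: tl => if n - 1 == last then pvGroupA first n tl
               else (first, last) :: pvGroupA n n tl

def consectutive_group_to_string (l : List Int) : String :=
  match l with
  | [] => ""          -- A raises IndexError here (L[0]); excluded by Pre_
  | x :: rest =>
    let grouped := pvGroupA x x rest
    let out := (PySem.List.enumerate grouped 0).foldl (fun out_string p =>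
        let out_string := if p.1 ≠ 0 then out_string ++ " and" else out_string
        if p.2.1 ≠ p.2.2 then
          out_string ++ " " ++ PySem.Int.toStr p.2.1 ++ "-" ++ PySem.Int.toStr p.2.2
        else
          out_string ++ " " ++ PySem.Int.toStr p.2.1)
      "Successfully added data on teams in positions"
    out ++ "."

-- ===== PORT B =====
def consectutive_group_to_string_alt (l : List Int) : String :=
  let n : Int := l.length
  let breaks := (PySem.List.pyRange 1 n 1).filter
      (fun i => PySem.List.pyGetD l i 0 ≠ PySem.List.pyGetD l (i - 1) 0 + 1)
  let bounds := 0 :: breaks ++ [n]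
  let pieces := (bounds.zip (bounds.drop 1)).map (fun p =>
      let a := PySem.List.pyGetD l p.1 0
      let b := PySem.List.pyGetD l (p.2 - 1) 0
      if a = b then PySem.Int.toStr a
      else PySem.Int.toStr a ++ "-" ++ PySem.Int.toStr b)
  "Successfully added data on teams in positions " ++ PySem.Str.join " and " pieces ++ "."

-- ===== PRECONDITION & SPEC =====
-- A raises IndexError on the empty list (L[0]); B raises there as well. Pre_ excludes only that input.
def Pre_consectutive_group_to_string (l : List Int) : Prop := l ≠ []
instance (l : List Int) : Decidable (Pre_consectutive_group_to_string l) := by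
  unfold Pre_consectutive_group_to_string; infer_instance
def pvWitness_consectutive_group_to_string : List Int := [1, 2, 5]

def Spec_consectutive_group_to_string (l : List Int) (out : String) : Prop :=
  out = consectutive_group_to_string_alt l
instance (l : List Int) (out : String) : Decidable (Spec_consectutive_group_to_string l out) := by
  unfold Spec_consectutive_group_to_string; infer_instance

-- ===== CLAIM =====
def Claim_equal_consectutive_group_to_string : Prop :=
  ∀ (l : List Int), Dom_consectutive_group_to_string l →
    Pre_consectutive_group_to_string l →
    Spec_consectutive_group_to_string l (consectutive_group_to_string l)

-- ===== LEMMAS AND PROOFS =====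

-- the formatted piece of one group
def pvPiece (p : Int × Int) : String :=
  if p.1 = p.2 then PySem.Int.toStr p.1
  else PySem.Int.toStr p.1 ++ "-" ++ PySem.Int.toStr p.2

def pvCat : List String → String
  | [] => ""
  | s :: l => s ++ pvCat l

theorem pvStrJoin_cons_cons (sep a b : String) (l : List String) :
    PySem.Str.join sep (a :: b :: l) = a ++ sep ++ PySem.Str.join sep (b :: l) := by
  apply String.toList_injective
  simp [PySem.Str.toList_join, PySem.Chars.join_cons_cons]

theorem pvStrJoin_singleton (sep a : String) : PySem.Str.join sep [a] = a := by
  apply String.toList_injective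
  simp [PySem.Str.toList_join, PySem.Chars.join_singleton]

theorem pvFoldA (gs : List (Int × Int)) (init : String) (k : Int) (hk : 1 ≤ k) :
    (PySem.List.enumerate gs k).foldl (fun out_string p =>
        let out_string := if p.1 ≠ 0 then out_string ++ " and" else out_string
        if p.2.1 ≠ p.2.2 then
          out_string ++ " " ++ PySem.Int.toStr p.2.1 ++ "-" ++ PySem.Int.toStr p.2.2
        else
          out_string ++ " " ++ PySem.Int.toStr p.2.1) init
    = init ++ pvCat (gs.map (fun g => " and " ++ pvPiece g)) := by
  induction gs generalizing init k with
  | nil => simp [PySem.List.enumerate_nil, pvCat]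
  | cons g gs ih =>
    rw [PySem.List.enumerate_cons, List.foldl_cons]
    have hk0 : k ≠ 0 := by omega
    by_cases hg : g.1 = g.2
    · simp only [hk0, ne_eq, hg, not_true_eq_false, if_false]
      rw [ih _ (k + 1) (by omega)]
      simp [pvCat, pvPiece, hg, String.append_assoc]
    · simp only [hk0, ne_eq, not_false_eq_true, if_true, hg]
      rw [ih _ (k + 1) (by omega)]
      simp [pvCat, pvPiece, hg, String.append_assoc]

theorem pvJoinCat (ps : List String) (p : String) :
    p ++ pvCat (ps.map (fun q => " and " ++ q)) = PySem.Str.join " and " (p :: ps) := by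
  induction ps generalizing p with
  | nil => simp [pvCat, pvStrJoin_singleton]
  | cons q ps ih =>
    rw [pvStrJoin_cons_cons, ← ih q]
    simp [pvCat, String.append_assoc]

theorem pvGroupA_ne_nil (f last : Int) (rest : List Int) : pvGroupA f last rest ≠ [] := by
  induction rest generalizing f last with
  | nil => simp [pvGroupA]
  | cons n tl ih =>
    rw [pvGroupA]
    by_cases h : (n - 1 == last) = true
    · rw [if_pos h]; exact ih f n
    · rw [if_neg h]; simp

theorem pvA_eq (x : Int) (rest : List Int) :
    consectutive_group_to_string (x :: rest)
    = "Successfully added data on teams in positions "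
      ++ PySem.Str.join " and " ((pvGroupA x x rest).map pvPiece) ++ "." := by
  obtain ⟨g0, gs, hgs⟩ := List.exists_cons_of_ne_nil (pvGroupA_ne_nil x x rest)
  show ((PySem.List.enumerate (pvGroupA x x rest) 0).foldl _ _) ++ "." = _
  rw [hgs, PySem.List.enumerate_cons, List.foldl_cons,
    show (0:Int) + 1 = 1 from by norm_num, pvFoldA _ _ 1 (by omega),
    List.map_cons, ← pvJoinCat, List.map_map]
  by_cases hg : g0.1 = g0.2 <;>
    simp [pvPiece, hg, String.append_assoc] <;>
    exact congrArg pvCat (List.map_congr_left (fun g _ => by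
      simp [pvPiece, String.append_assoc]))

def pvBreaks (l : List Int) : List Int :=
  (PySem.List.pyRange 1 (l.length : Int) 1).filter
      (fun i => PySem.List.pyGetD l i 0 ≠ PySem.List.pyGetD l (i - 1) 0 + 1)

theorem pvShiftGet (x : Int) (l : List Int) (a : Int) (ha : 0 ≤ a) :
    PySem.List.pyGetD (x :: l) (a + 1) 0 = PySem.List.pyGetD l a 0 := by
  obtain ⟨k, rfl⟩ : ∃ k : Nat, a = (k : Int) := ⟨a.toNat, (Int.toNat_of_nonneg ha).symm⟩
  have h : ((k : Int) + 1) = ((k + 1 : Nat) : Int) := by push_cast; ring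
  rw [h, PySem.List.pyGetD_natCast, PySem.List.pyGetD_natCast]
  simp

theorem pvS1 (x y : Int) (tl : List Int) :
    pvBreaks (x :: y :: tl)
    = (if y ≠ x + 1 then [(1:Int)] else []) ++ (pvBreaks (y :: tl)).map (· + 1) := by
  rw [pvBreaks, pvBreaks, PySem.List.pyRange_one, PySem.List.pyRange_one]
  have h1 : (((x :: y :: tl).length : Int) - 1).toNat = tl.length + 1 := by simp
  have h2 : (((y :: tl).length : Int) - 1).toNat = tl.length := by simp
  rw [h1, h2, List.range_succ_eq_map]
  rw [List.filter_map, List.filter_map, List.filter_cons, List.filter_map]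
  simp only [List.map_map, Function.comp_def, Nat.succ_eq_add_one]
  have hc0 : (decide (PySem.List.pyGetD (x :: y :: tl) ((1:Int) + ((0:Nat):Int)) 0 ≠ PySem.List.pyGetD (x :: y :: tl) ((1:Int) + ((0:Nat):Int) - 1) 0 + 1)) = decide (y ≠ x + 1) := by
    norm_num [pysem]
  rw [hc0]
  have hfilt : ∀ k : Nat,
      (decide (PySem.List.pyGetD (x :: y :: tl) ((1:Int) + ((k + 1 : Nat):Int)) 0 ≠ PySem.List.pyGetD (x :: y :: tl) ((1:Int) + ((k + 1 : Nat):Int) - 1) 0 + 1))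
      = (decide (PySem.List.pyGetD (y :: tl) ((1:Int) + (k:Int)) 0 ≠ PySem.List.pyGetD (y :: tl) ((1:Int) + (k:Int) - 1) 0 + 1)) := by
    intro k
    have e1 : (1:Int) + ((k + 1 : Nat):Int) = ((k:Int) + 1) + 1 := by push_cast; ring
    rw [e1]
    have e2 : ((k:Int) + 1) + 1 - 1 = (k:Int) + 1 := by ring
    have r1 : (1:Int) + (k:Int) = (k:Int) + 1 := by ring
    rw [e2, r1]
    have r3 : ((k:Int) + 1) - 1 = (k:Int) := by ring
    rw [r3, pvShiftGet x _ _ (by positivity), pvShiftGet x _ _ (by positivity)]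
  rw [List.filter_congr (fun k _ => hfilt k)]
  have hmapeq : ∀ k : Nat, (1:Int) + ((k + 1 : Nat):Int) = ((1:Int) + (k:Int)) + 1 := by
    intro k; push_cast; ring
  have hmap : ∀ L : List Nat, List.map (fun k : Nat => (1:Int) + (k:Int)) (List.map Nat.succ L)
      = List.map (fun k : Nat => ((1:Int) + (k:Int)) + 1) L := by
    intro L
    rw [List.map_map]
    exact List.map_congr_left (fun k _ => by simp [Function.comp]; ring)
  by_cases hy : y = x + 1
  · simp only [hy, ne_eq, not_true_eq_false, decide_false, Bool.false_eq_true, if_false,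
      List.nil_append]
    exact hmap _
  · simp only [ne_eq, hy, not_false_eq_true, decide_true, if_true, List.cons_append,
      List.nil_append, List.map_cons]
    rw [hmap _]
    norm_num

def pvAdj (l : List Int) (s : Int) : List Int → List (Int × Int)
  | [] => []
  | e :: t => (PySem.List.pyGetD l s 0, PySem.List.pyGetD l (e - 1) 0) :: pvAdj l e t

def pvPairsOf (l : List Int) : List (Int × Int) :=
  pvAdj l 0 (pvBreaks l ++ [(l.length : Int)])

def pvSetFirst (f : Int) : List (Int × Int) → List (Int × Int)
  | [] => []
  | p :: t => (f, p.2) :: t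

theorem pvAdjShift (x : Int) (l' : List Int) (u : List Int) :
    ∀ a : Int, 0 ≤ a → (∀ e ∈ u, 1 ≤ e) →
    pvAdj (x :: l') (a + 1) (u.map (· + 1)) = pvAdj l' a u := by
  induction u with
  | nil => intro a _ _; rfl
  | cons e t ih =>
    intro a ha hu
    have he : 1 ≤ e := hu e (by simp)
    rw [List.map_cons, pvAdj, pvAdj]
    have h1 : e + 1 - 1 = (e - 1) + 1 := by ring
    rw [h1, pvShiftGet x _ _ ha, pvShiftGet x _ _ (by omega)]
    congr 1
    exact ih e (by omega) (fun e' he' => hu e' (by simp [he']))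

theorem pvBreaks_ge_one (l : List Int) : ∀ e ∈ pvBreaks l, 1 ≤ e := by
  intro e he
  rw [pvBreaks] at he
  have := List.mem_of_mem_filter he
  exact ((PySem.List.mem_pyRange_one).1 this).1

theorem pvMain (rest : List Int) : ∀ last f : Int,
    pvSetFirst f (pvPairsOf (last :: rest)) = pvGroupA f last rest := by
  induction rest with
  | nil =>
    intro last f
    rw [pvPairsOf, pvBreaks]
    rw [PySem.List.pyRange_one_eq_nil (by simp)]
    simp only [List.filter_nil, List.nil_append]
    show pvSetFirst f (pvAdj [last] 0 [(1:Int)]) = _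
    norm_num [pysem, pvAdj, pvSetFirst, pvGroupA]
  | cons y tl ih =>
    intro last f
    set bs' := pvBreaks (y :: tl) with hbs'
    have hlenL : (((last :: y :: tl).length : Int)) = ((tl.length : Int) + 1) + 1 := by
      push_cast [List.length_cons]; ring
    have hlen' : (((y :: tl).length : Int)) = (tl.length : Int) + 1 := by
      simp
    obtain ⟨e, t, hu⟩ : ∃ e t, bs' ++ [((tl.length : Int) + 1)] = e :: t := by
      cases bs' with
      | nil => exact ⟨_, _, rfl⟩
      | cons b bt => exact ⟨_, _, rfl⟩
    have hall : ∀ e' ∈ bs' ++ [((tl.length : Int) + 1)], 1 ≤ e' := by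
      intro e' he'
      rcases List.mem_append.1 he' with h | h
      · exact pvBreaks_ge_one _ _ h
      · simp at h; omega
    have he1 : 1 ≤ e := hall e (by rw [hu]; simp)
    have hallt : ∀ e' ∈ t, 1 ≤ e' := fun e' he' => hall e' (by rw [hu]; simp [he'])
    have hmapu : (bs'.map (· + 1)) ++ [((tl.length : Int) + 1) + 1]
        = (e + 1) :: t.map (· + 1) := by
      have h := congrArg (List.map (· + 1)) hu
      rw [List.map_append, List.map_cons] at h
      simpa using h
    have hPairsL : pvPairsOf (last :: y :: tl)
        = pvAdj (last :: y :: tl) 0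
            ((if y ≠ last + 1 then [(1:Int)] else []) ++ ((e + 1) :: t.map (· + 1))) := by
      rw [pvPairsOf, pvS1, hlenL, ← hmapu, ← hbs']
      rw [List.append_assoc]
    have hPairs' : pvPairsOf (y :: tl) = pvAdj (y :: tl) 0 (e :: t) := by
      rw [pvPairsOf, hlen', ← hbs', hu]
    have hy0 : PySem.List.pyGetD (y :: tl) 0 0 = y := by simp [pysem]
    by_cases hy : y = last + 1
    · -- consecutive: no break at position 1
      have hcond : (y - 1 == last) = true := by simp [hy]
      rw [pvGroupA, hcond, if_pos rfl, ← ih y f]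
      rw [hPairsL, if_neg (by omega), List.nil_append, pvAdj, hPairs', pvAdj]
      have h1 : e + 1 - 1 = (e - 1) + 1 := by ring
      rw [h1, pvShiftGet last _ _ (by omega)]
      have h2 : (e - 1) + 1 = e := by ring
      rw [show pvAdj (last :: y :: tl) (e + 1) (t.map (· + 1)) = pvAdj (y :: tl) e t from
        pvAdjShift last (y :: tl) t e (by omega) hallt]
      rfl
    · -- a break at position 1
      have hcond : ¬ ((y - 1 == last) = true) := by simp; omega
      rw [pvGroupA, if_neg hcond, ← ih y y]
      rw [hPairsL, if_pos (by omega), List.cons_append, List.nil_append, pvAdj]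
      have h00 : (1:Int) - 1 = 0 := by ring
      rw [h00]
      have hz : pvAdj (last :: y :: tl) 1 ((e + 1) :: t.map (· + 1))
          = pvAdj (y :: tl) 0 (e :: t) := by
        have h := pvAdjShift last (y :: tl) (e :: t) 0 (by omega)
          (fun e' he' => by
            rcases List.mem_cons.1 he' with h | h
            · omega
            · exact hallt _ h)
        rw [show (0:Int) + 1 = 1 from by ring] at h
        rw [← h, List.map_cons]
      rw [hz, hPairs', pvAdj, pvSetFirst, pvSetFirst, hy0]
      have hL0 : PySem.List.pyGetD (last :: y :: tl) 0 0 = last := by simp [pysem]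
      rw [hL0]

-- B's pair list, named for the proofs
def pvPairsB (l : List Int) : List (Int × Int) :=
  let n : Int := l.length
  let breaks := (PySem.List.pyRange 1 n 1).filter
      (fun i => PySem.List.pyGetD l i 0 ≠ PySem.List.pyGetD l (i - 1) 0 + 1)
  let bounds := 0 :: breaks ++ [n]
  (bounds.zip (bounds.drop 1)).map (fun p =>
      (PySem.List.pyGetD l p.1 0, PySem.List.pyGetD l (p.2 - 1) 0))

theorem pvB_eq (l : List Int) :
    consectutive_group_to_string_alt l
    = "Successfully added data on teams in positions "
      ++ PySem.Str.join " and " ((pvPairsB l).map pvPiece) ++ "." := by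
  rw [consectutive_group_to_string_alt, pvPairsB, List.map_map]
  rfl

theorem pvZipAdj (l : List Int) (bs : List Int) : ∀ s : Int,
    (((s :: bs).zip ((s :: bs).drop 1)).map (fun p =>
        (PySem.List.pyGetD l p.1 0, PySem.List.pyGetD l (p.2 - 1) 0)))
    = pvAdj l s bs := by
  induction bs with
  | nil => intro s; rfl
  | cons e t ih =>
    intro s
    rw [List.drop_one, List.tail_cons, List.zip_cons_cons, List.map_cons, pvAdj]
    have h := ih e
    rw [List.drop_one, List.tail_cons] at h
    rw [h]

theorem pvPairsB_eq_pairsOf (l : List Int) : pvPairsB l = pvPairsOf l := by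
  rw [pvPairsB, pvPairsOf, ← pvBreaks, List.cons_append, ← pvZipAdj]

theorem pvPairs_main (x : Int) (rest : List Int) :
    pvPairsB (x :: rest) = pvGroupA x x rest := by
  rw [pvPairsB_eq_pairsOf, ← pvMain rest x x]
  -- the first pair's left endpoint is already x, so pvSetFirst x is the identity
  rw [pvPairsOf]
  obtain ⟨e, t, hu⟩ : ∃ e t,
      pvBreaks (x :: rest) ++ [(((x :: rest).length : Int))] = e :: t := by
    cases pvBreaks (x :: rest) with
    | nil => exact ⟨_, _, rfl⟩
    | cons b bt => exact ⟨_, _, rfl⟩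
  rw [hu, pvAdj, pvSetFirst]
  simp [pysem]

-- ===== VERDICT =====
theorem consectutive_group_to_string_spec : Claim_equal_consectutive_group_to_string := by
  intro l _ hpre
  unfold Spec_consectutive_group_to_string
  match l with
  | [] => exact absurd rfl hpre
  | x :: rest => rw [pvA_eq, pvB_eq, pvPairs_main]
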